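-- pv_equiv track=rewrite | github.com/siddharth404/decyphr_project | decyphr/analysis_plugins/p16_geospatial/run_analysis.py | _find_lat_lon_columns
-- ===== SOURCE A (Python) =====
-- from typing import Dict, Any, Optional, List, Tuple
--
-- def _find_lat_lon_columns(columns: List[str]) -> Optional[Tuple[str, str]]:
--     """Helper function to find likely latitude and longitude columns."""
--     lat_names = ['latitude', 'lat', 'lat_dd', 'y']
--     lon_names = ['longitude', 'lon', 'long', 'lng', 'lon_dd', 'x']
--
--     lat_col, lon_col = None, None
--
--     for col in columns:
--         if col.lower() in lat_names:
--             lat_col = col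
--             break
--     for col in columns:
--         if col.lower() in lon_names:
--             lon_col = col
--             break
--
--     if lat_col and lon_col:
--         return lat_col, lon_col
--     return None
-- ===== SOURCE B (Python) =====
-- def _find_lat_lon_columns(columns):
--     """Single pass over columns: fill each slot with its first match, stop once both are set."""
--     lat_names = ['latitude', 'lat', 'lat_dd', 'y']
--     lon_names = ['longitude', 'lon', 'long', 'lng', 'lon_dd', 'x']
--
--     lat_col, lon_col = None, None
--     for col in columns:
--         low = col.lower()
--         if lat_col is None and low in lat_names:
--             lat_col = col
--         if lon_col is None and low in lon_names:
--             lon_col = col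
--         if lat_col is not None and lon_col is not None:
--             return lat_col, lon_col
--     return None
-- ===== Notes on version B (the rewrite author's own statement) =====
-- stated objective: alternative
-- what changed: Replaces A's two separate break-on-first-match scans with one single pass that fills both slots (first match each) and exits as soon as both are found.
import Mathlib
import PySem

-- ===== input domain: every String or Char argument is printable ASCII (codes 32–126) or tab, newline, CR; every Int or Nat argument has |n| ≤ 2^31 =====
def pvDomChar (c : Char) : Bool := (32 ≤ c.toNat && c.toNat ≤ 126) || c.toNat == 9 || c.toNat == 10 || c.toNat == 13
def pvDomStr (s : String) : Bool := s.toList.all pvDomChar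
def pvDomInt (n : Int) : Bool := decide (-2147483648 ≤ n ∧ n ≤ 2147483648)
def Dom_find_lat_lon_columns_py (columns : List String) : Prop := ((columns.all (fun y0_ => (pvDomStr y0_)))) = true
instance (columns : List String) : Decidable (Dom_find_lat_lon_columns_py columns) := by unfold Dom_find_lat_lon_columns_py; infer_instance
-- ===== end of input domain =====

-- B replaces A's two break-on-first-match scans by one single pass filling both slots
-- with early exit once both are set (objective: alternative decomposition, same cost).

-- ===== PORT A =====
def pyLatNames : List String := ["latitude", "lat", "lat_dd", "y"]
def pyLonNames : List String := ["longitude", "lon", "long", "lng", "lon_dd", "x"]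

-- two independent for-loops, each breaking at its first match; the final
-- 'if lat_col and lon_col' truthiness: a matched column lowercases to a nonempty
-- name, hence is never the falsy "", so it is exactly 'both were found'.
def find_lat_lon_columns_py (columns : List String) : Option (String × String) :=
  let lat_col := columns.find? (fun col => pyLatNames.contains (PySem.Str.lower col))
  let lon_col := columns.find? (fun col => pyLonNames.contains (PySem.Str.lower col))
  match lat_col, lon_col with
  | some a, some b => some (a, b)
  | _, _ => none

-- ===== PORT B =====
def pyLatNamesB : List String := ["latitude", "lat", "lat_dd", "y"]
def pyLonNamesB : List String := ["longitude", "lon", "long", "lng", "lon_dd", "x"]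

-- single loop carrying both slots; returns as soon as both are filled
def bScan (lat lon : Option String) : List String → Option (String × String)
  | [] => none
  | col :: rest =>
    let low := PySem.Str.lower col
    let lat' := if lat.isNone && pyLatNamesB.contains low then some col else lat
    let lon' := if lon.isNone && pyLonNamesB.contains low then some col else lon
    match lat' with
    | some a =>
      match lon' with
      | some b => some (a, b)
      | none => bScan lat' lon' rest
    | none => bScan lat' lon' rest

def find_lat_lon_columns_py_alt (columns : List String) : Option (String × String) :=
  bScan none none columns

-- ===== PRECONDITION & SPEC =====
def Spec_find_lat_lon_columns_py (columns : List String) (out : Option (String × String)) : Prop := out = find_lat_lon_columns_py_alt columns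
instance (columns : List String) (out : Option (String × String)) : Decidable (Spec_find_lat_lon_columns_py columns out) := by unfold Spec_find_lat_lon_columns_py; infer_instance

-- ===== CLAIM (what is proved, stated in full; the proofs are below) =====
def Claim_equal_find_lat_lon_columns_py : Prop := ∀ (columns : List String), Dom_find_lat_lon_columns_py columns → Spec_find_lat_lon_columns_py columns (find_lat_lon_columns_py columns)

-- ===== LEMMAS AND PROOFS =====

-- pairing of the two first matches, the shape A's final 'if' computes
def pvCombine : Option String → Option String → Option (String × String)
  | some a, some b => some (a, b)
  | _, _ => none

-- loop invariant of B's single pass: with at most one slot already filled, the scan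
-- returns the pairing of each slot's value-or-first-match over the remaining columns
theorem bScan_eq (cols : List String) : ∀ (lat lon : Option String), lat = none ∨ lon = none →
    bScan lat lon cols =
      pvCombine (lat.or (cols.find? (fun col => pyLatNamesB.contains (PySem.Str.lower col))))
                (lon.or (cols.find? (fun col => pyLonNamesB.contains (PySem.Str.lower col)))) := by
  induction cols with
  | nil =>
    intro lat lon h
    cases lat <;> cases lon <;> simp_all [bScan, pvCombine]
  | cons col rest ih =>
    intro lat lon h
    by_cases hP : pyLatNamesB.contains (PySem.Str.lower col) = true <;>
    by_cases hQ : pyLonNamesB.contains (PySem.Str.lower col) = true <;>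
      cases lat <;> cases lon <;>
      simp_all [bScan, List.find?, pvCombine, ih]

-- ===== VERDICT (by name: the statement is the Claim_ definition above) =====
theorem find_lat_lon_columns_py_spec : Claim_equal_find_lat_lon_columns_py := by
  intro columns _
  show find_lat_lon_columns_py columns = find_lat_lon_columns_py_alt columns
  unfold find_lat_lon_columns_py find_lat_lon_columns_py_alt
  rw [bScan_eq columns none none (Or.inl rfl)]
  have hlat : pyLatNames = pyLatNamesB := rfl
  have hlon : pyLonNames = pyLonNamesB := rfl
  simp [pvCombine, hlat, hlon]
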